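-- pv_equiv track=rewrite | github.com/WTNSB/Chord-judgment | engine/fallback_generator.py | generate_chord_names
-- ===== SOURCE A (Python) =====
-- from typing import Set, List
--
-- def generate_chord_names(intervals: Set[str]) -> List[str]:
--     # 1. 骨格の判定（3度、5度、7度の組み合わせ）
--     has_M3 = 'M3' in intervals
--     has_m3 = 'm3' in intervals
--     has_M7 = 'M7' in intervals
--     has_m7 = 'm7' in intervals
--     has_P5 = 'P5' in intervals
--     has_d5 = 'd5' in intervals
--     has_A5 = 'A5' in intervals
--     has_d7 = 'd7' in intervals
--
--     base_options = []
--
--     # 4和音の骨格判定（特殊な5度を含むものを優先して判定）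
--     if has_M3 and has_A5 and has_m7:
--         base_options.extend(["aug7", "7(#5)"])  # ★両方の表記を登録
--     elif has_M3 and has_A5 and has_M7:
--         base_options.extend(["augM7", "Maj7(#5)"])
--     elif has_m3 and has_d5 and has_m7: base_options.append("m7b5")
--     elif has_m3 and has_d5 and has_d7: base_options.append("dim7")
--     elif has_M3 and has_M7: base_options.append("Maj7")
--     elif has_m3 and has_m7: base_options.append("m7")
--     elif has_M3 and has_m7: base_options.append("7")
--     elif has_m3 and has_M7: base_options.append("mM7")
--
--     # 3和音の骨格判定
--     elif has_M3 and has_A5: base_options.append("aug")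
--     elif has_m3 and has_d5: base_options.append("dim")
--     elif has_M3: base_options.append("Major")
--     elif has_m3: base_options.append("Minor")
--
--     if not base_options:
--         return []
--
--     # 2. テンションの抽出
--     tensions = []
--     if 'm9' in intervals: tensions.append("b9")
--     if 'M9' in intervals: tensions.append("9")
--     if 'A9' in intervals: tensions.append("#9")
--     if 'P11' in intervals: tensions.append("11")
--     if 'A11' in intervals: tensions.append("#11")
--     if 'm13' in intervals: tensions.append("b13")
--     if 'M13' in intervals: tensions.append("13")
--
--     # 3. Omit5判定 (5度の音がどれも含まれていない場合)
--     omit_str = ""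
--     rep_base = base_options[0]
--     if not (has_P5 or has_d5 or has_A5) and rep_base not in ["dim7", "dim", "aug7", "augM7", "m7b5", "aug"]:
--         omit_str = "(omit5)"
--
--     # 4. 文字列の結合処理（カッコの中身を綺麗にまとめる）
--     results = []
--     for base in base_options:
--         if "(" in base and tensions:
--             # "7(#5)" のような表記に "#9" を足す場合 -> "7(#5, #9)" に整形
--             base_stripped = base.rstrip(")")
--             tension_joined = ", ".join(tensions)
--             chord_name = f"{base_stripped}, {tension_joined}){omit_str}"
--         else:
--             tension_str = f"({', '.join(tensions)})" if tensions else ""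
--             chord_name = f"{base}{tension_str}{omit_str}"
--
--         results.append(chord_name)
--
--     return results
-- ===== SOURCE B (Python) =====
-- from typing import Set, List
--
-- # Ordered rule table: first entry whose required intervals are all present wins
-- # (same priority order as the original elif cascade).
-- _BASE_RULES = [
--     (('M3', 'A5', 'm7'), ["aug7", "7(#5)"]),
--     (('M3', 'A5', 'M7'), ["augM7", "Maj7(#5)"]),
--     (('m3', 'd5', 'm7'), ["m7b5"]),
--     (('m3', 'd5', 'd7'), ["dim7"]),
--     (('M3', 'M7'), ["Maj7"]),
--     (('m3', 'm7'), ["m7"]),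
--     (('M3', 'm7'), ["7"]),
--     (('m3', 'M7'), ["mM7"]),
--     (('M3', 'A5'), ["aug"]),
--     (('m3', 'd5'), ["dim"]),
--     (('M3',), ["Major"]),
--     (('m3',), ["Minor"]),
-- ]
--
-- _TENSION_TABLE = [
--     ('m9', 'b9'), ('M9', '9'), ('A9', '#9'), ('P11', '11'),
--     ('A11', '#11'), ('m13', 'b13'), ('M13', '13'),
-- ]
--
-- _NO_OMIT5 = ("dim7", "dim", "aug7", "augM7", "m7b5", "aug")
--
--
-- def _format(base: str, tensions: List[str], omit_str: str) -> str:
--     if "(" in base and tensions: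
--         return f"{base.rstrip(')')}, {', '.join(tensions)}){omit_str}"
--     tension_str = f"({', '.join(tensions)})" if tensions else ""
--     return f"{base}{tension_str}{omit_str}"
--
--
-- def generate_chord_names(intervals: Set[str]) -> List[str]:
--     base_options = next(
--         (names for req, names in _BASE_RULES if all(iv in intervals for iv in req)),
--         None,
--     )
--     if base_options is None:
--         return []
--
--     tensions = [name for iv, name in _TENSION_TABLE if iv in intervals]
--
--     omit_str = ""
--     if not any(iv in intervals for iv in ('P5', 'd5', 'A5')) \
--             and base_options[0] not in _NO_OMIT5:
--         omit_str = "(omit5)"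
--
--     return [_format(base, tensions, omit_str) for base in base_options]
-- ===== Notes on version B (the rewrite author's own statement) =====
-- stated objective: idiomatic
-- what changed: Replaces the 12-branch elif cascade and the seven tension ifs by ordered data tables (first-matching rule scan, tension filter) with a separate formatting helper.
import Mathlib
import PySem

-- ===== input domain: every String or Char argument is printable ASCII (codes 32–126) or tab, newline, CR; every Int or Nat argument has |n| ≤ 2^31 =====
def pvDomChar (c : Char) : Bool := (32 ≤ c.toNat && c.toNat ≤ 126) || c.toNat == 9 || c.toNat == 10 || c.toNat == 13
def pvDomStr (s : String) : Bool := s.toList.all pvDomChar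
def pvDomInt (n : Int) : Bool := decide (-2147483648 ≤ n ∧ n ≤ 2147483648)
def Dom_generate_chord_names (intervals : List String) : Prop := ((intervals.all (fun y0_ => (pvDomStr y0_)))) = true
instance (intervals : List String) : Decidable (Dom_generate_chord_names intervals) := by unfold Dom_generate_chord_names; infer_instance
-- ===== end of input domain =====

-- B replaces A's 12-branch elif cascade and seven tension ifs by ordered data tables
-- (first-matching-rule scan, tension filter) with a separate formatting helper: idiomatic, same cost.

-- shared exact primitive: Python str.rstrip(chars) (both Pythons call .rstrip(")")); exact on all strings
def pyRstripChars (s : String) (chars : List Char) : String :=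
  String.ofList ((s.toList.reverse.dropWhile (fun c => chars.contains c)).reverse)

-- ===== PORT A =====
def generate_chord_names (intervals : List String) : List String :=
  let has_M3 := intervals.contains "M3"
  let has_m3 := intervals.contains "m3"
  let has_M7 := intervals.contains "M7"
  let has_m7 := intervals.contains "m7"
  let has_P5 := intervals.contains "P5"
  let has_d5 := intervals.contains "d5"
  let has_A5 := intervals.contains "A5"
  let has_d7 := intervals.contains "d7"
  let base_options : List String :=
    if has_M3 && has_A5 && has_m7 then ([] : List String) ++ ["aug7", "7(#5)"]
    else if has_M3 && has_A5 && has_M7 then ([] : List String) ++ ["augM7", "Maj7(#5)"]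
    else if has_m3 && has_d5 && has_m7 then ([] : List String) ++ ["m7b5"]
    else if has_m3 && has_d5 && has_d7 then ([] : List String) ++ ["dim7"]
    else if has_M3 && has_M7 then ([] : List String) ++ ["Maj7"]
    else if has_m3 && has_m7 then ([] : List String) ++ ["m7"]
    else if has_M3 && has_m7 then ([] : List String) ++ ["7"]
    else if has_m3 && has_M7 then ([] : List String) ++ ["mM7"]
    else if has_M3 && has_A5 then ([] : List String) ++ ["aug"]
    else if has_m3 && has_d5 then ([] : List String) ++ ["dim"]
    else if has_M3 then ([] : List String) ++ ["Major"]
    else if has_m3 then ([] : List String) ++ ["Minor"]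
    else []
  if base_options.isEmpty then []
  else
    let tensions : List String := []
    let tensions := if intervals.contains "m9" then tensions ++ ["b9"] else tensions
    let tensions := if intervals.contains "M9" then tensions ++ ["9"] else tensions
    let tensions := if intervals.contains "A9" then tensions ++ ["#9"] else tensions
    let tensions := if intervals.contains "P11" then tensions ++ ["11"] else tensions
    let tensions := if intervals.contains "A11" then tensions ++ ["#11"] else tensions
    let tensions := if intervals.contains "m13" then tensions ++ ["b13"] else tensions
    let tensions := if intervals.contains "M13" then tensions ++ ["13"] else tensions
    let rep_base := PySem.List.pyGetD base_options 0 ""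
    let omit_str :=
      if !(has_P5 || has_d5 || has_A5)
          && !(["dim7", "dim", "aug7", "augM7", "m7b5", "aug"].contains rep_base) then "(omit5)"
      else ""
    base_options.foldl (fun results base =>
      results ++
        [if PySem.Str.isIn "(" base && !tensions.isEmpty then
           pyRstripChars base [')'] ++ ", " ++ PySem.Str.join ", " tensions ++ ")" ++ omit_str
         else
           let tension_str := if !tensions.isEmpty then "(" ++ PySem.Str.join ", " tensions ++ ")" else ""
           base ++ tension_str ++ omit_str]) []

-- ===== PORT B =====
def bBaseRules : List (List String × List String) :=
  [(["M3", "A5", "m7"], ["aug7", "7(#5)"]),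
   (["M3", "A5", "M7"], ["augM7", "Maj7(#5)"]),
   (["m3", "d5", "m7"], ["m7b5"]),
   (["m3", "d5", "d7"], ["dim7"]),
   (["M3", "M7"], ["Maj7"]),
   (["m3", "m7"], ["m7"]),
   (["M3", "m7"], ["7"]),
   (["m3", "M7"], ["mM7"]),
   (["M3", "A5"], ["aug"]),
   (["m3", "d5"], ["dim"]),
   (["M3"], ["Major"]),
   (["m3"], ["Minor"])]

def bTensionTable : List (String × String) :=
  [("m9", "b9"), ("M9", "9"), ("A9", "#9"), ("P11", "11"),
   ("A11", "#11"), ("m13", "b13"), ("M13", "13")]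

def bNoOmit5 : List String := ["dim7", "dim", "aug7", "augM7", "m7b5", "aug"]

-- first rule of the table all of whose required intervals are present ('next(…)' in Source B)
def bFirstMatch (intervals : List String) : List (List String × List String) → Option (List String)
  | [] => none
  | (req, names) :: rest =>
      if req.all (fun iv => intervals.contains iv) then some names
      else bFirstMatch intervals rest

-- the tension list comprehension of Source B, as structural recursion over the table
def bSelectTensions (intervals : List String) : List (String × String) → List String
  | [] => []
  | p :: rest =>
      if intervals.contains p.1 then p.2 :: bSelectTensions intervals rest
      else bSelectTensions intervals rest

def bFormat (base : String) (tensions : List String) (omit_str : String) : String :=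
  if PySem.Str.isIn "(" base && !tensions.isEmpty then
    pyRstripChars base [')'] ++ ", " ++ PySem.Str.join ", " tensions ++ ")" ++ omit_str
  else
    let tension_str := if !tensions.isEmpty then "(" ++ PySem.Str.join ", " tensions ++ ")" else ""
    base ++ tension_str ++ omit_str

def generate_chord_names_alt (intervals : List String) : List String :=
  match bFirstMatch intervals bBaseRules with
  | none => []
  | some base_options =>
      let tensions := bSelectTensions intervals bTensionTable
      let omit_str :=
        if !(["P5", "d5", "A5"].any (fun iv => intervals.contains iv))
            && !(bNoOmit5.contains (PySem.List.pyGetD base_options 0 "")) then "(omit5)"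
        else ""
      base_options.map (fun base => bFormat base tensions omit_str)

-- ===== PRECONDITION & SPEC =====
def Spec_generate_chord_names (intervals : List String) (out : List String) : Prop := out = generate_chord_names_alt intervals
instance (intervals : List String) (out : List String) : Decidable (Spec_generate_chord_names intervals out) := by unfold Spec_generate_chord_names; infer_instance

-- ===== CLAIM (what is proved, stated in full; the proofs are below) =====
def Claim_equal_generate_chord_names : Prop := ∀ (intervals : List String), Dom_generate_chord_names intervals → Spec_generate_chord_names intervals (generate_chord_names intervals)

-- ===== LEMMAS AND PROOFS =====

-- A's tension-building if-chain, abstracted over the seven membership booleans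
def tensA (c1 c2 c3 c4 c5 c6 c7 : Bool) : List String :=
  let t : List String := []
  let t := if c1 then t ++ ["b9"] else t
  let t := if c2 then t ++ ["9"] else t
  let t := if c3 then t ++ ["#9"] else t
  let t := if c4 then t ++ ["11"] else t
  let t := if c5 then t ++ ["#11"] else t
  let t := if c6 then t ++ ["b13"] else t
  let t := if c7 then t ++ ["13"] else t
  t

-- B's tension selection, abstracted over the same booleans
def tensB (c1 c2 c3 c4 c5 c6 c7 : Bool) : List String :=
  let t8 : List String := []
  let t7 := if c7 then "13" :: t8 else t8
  let t6 := if c6 then "b13" :: t7 else t7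
  let t5 := if c5 then "#11" :: t6 else t6
  let t4 := if c4 then "11" :: t5 else t5
  let t3 := if c3 then "#9" :: t4 else t4
  let t2 := if c2 then "9" :: t3 else t3
  if c1 then "b9" :: t2 else t2

lemma tens_eq (c1 c2 c3 c4 c5 c6 c7 : Bool) :
    tensA c1 c2 c3 c4 c5 c6 c7 = tensB c1 c2 c3 c4 c5 c6 c7 := by
  cases c1 <;> cases c2 <;> cases c3 <;> cases c4 <;> cases c5 <;> cases c6 <;> cases c7 <;> rfl

-- A's whole body, abstracted over the eight skeleton booleans and the tension booleans
def coreA (m3 M3 M7 m7 P5 d5 A5 d7 t1 t2 t3 t4 t5 t6 t7 : Bool) : List String :=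
  let base_options : List String :=
    if M3 && A5 && m7 then ([] : List String) ++ ["aug7", "7(#5)"]
    else if M3 && A5 && M7 then ([] : List String) ++ ["augM7", "Maj7(#5)"]
    else if m3 && d5 && m7 then ([] : List String) ++ ["m7b5"]
    else if m3 && d5 && d7 then ([] : List String) ++ ["dim7"]
    else if M3 && M7 then ([] : List String) ++ ["Maj7"]
    else if m3 && m7 then ([] : List String) ++ ["m7"]
    else if M3 && m7 then ([] : List String) ++ ["7"]
    else if m3 && M7 then ([] : List String) ++ ["mM7"]
    else if M3 && A5 then ([] : List String) ++ ["aug"]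
    else if m3 && d5 then ([] : List String) ++ ["dim"]
    else if M3 then ([] : List String) ++ ["Major"]
    else if m3 then ([] : List String) ++ ["Minor"]
    else []
  if base_options.isEmpty then []
  else
    let tensions := tensA t1 t2 t3 t4 t5 t6 t7
    let rep_base := PySem.List.pyGetD base_options 0 ""
    let omit_str :=
      if !(P5 || d5 || A5)
          && !(["dim7", "dim", "aug7", "augM7", "m7b5", "aug"].contains rep_base) then "(omit5)"
      else ""
    base_options.foldl (fun results base =>
      results ++
        [if PySem.Str.isIn "(" base && !tensions.isEmpty then
           pyRstripChars base [')'] ++ ", " ++ PySem.Str.join ", " tensions ++ ")" ++ omit_str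
         else
           let tension_str := if !tensions.isEmpty then "(" ++ PySem.Str.join ", " tensions ++ ")" else ""
           base ++ tension_str ++ omit_str]) []

-- B's whole body, abstracted the same way (bFirstMatch is unfolded over the literal rule table)
def coreB (m3 M3 M7 m7 P5 d5 A5 d7 t1 t2 t3 t4 t5 t6 t7 : Bool) : List String :=
  let bo : Option (List String) :=
    if M3 && (A5 && (m7 && true)) then some ["aug7", "7(#5)"]
    else if M3 && (A5 && (M7 && true)) then some ["augM7", "Maj7(#5)"]
    else if m3 && (d5 && (m7 && true)) then some ["m7b5"]
    else if m3 && (d5 && (d7 && true)) then some ["dim7"]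
    else if M3 && (M7 && true) then some ["Maj7"]
    else if m3 && (m7 && true) then some ["m7"]
    else if M3 && (m7 && true) then some ["7"]
    else if m3 && (M7 && true) then some ["mM7"]
    else if M3 && (A5 && true) then some ["aug"]
    else if m3 && (d5 && true) then some ["dim"]
    else if M3 && true then some ["Major"]
    else if m3 && true then some ["Minor"]
    else none
  match bo with
  | none => []
  | some base_options =>
      let tensions := tensB t1 t2 t3 t4 t5 t6 t7
      let omit_str :=
        if !(P5 || (d5 || (A5 || false)))
            && !(bNoOmit5.contains (PySem.List.pyGetD base_options 0 "")) then "(omit5)"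
        else ""
      base_options.map (fun base => bFormat base tensions omit_str)

lemma core_eq (m3 M3 M7 m7 P5 d5 A5 d7 t1 t2 t3 t4 t5 t6 t7 : Bool) :
    coreA m3 M3 M7 m7 P5 d5 A5 d7 t1 t2 t3 t4 t5 t6 t7
      = coreB m3 M3 M7 m7 P5 d5 A5 d7 t1 t2 t3 t4 t5 t6 t7 := by
  unfold coreA coreB
  rw [tens_eq]
  cases m3 <;> cases M3 <;> cases M7 <;> cases m7 <;>
    cases P5 <;> cases d5 <;> cases A5 <;> cases d7 <;> rfl

lemma A_eq_core (iv : List String) :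
    generate_chord_names iv
      = coreA (iv.contains "m3") (iv.contains "M3") (iv.contains "M7") (iv.contains "m7")
          (iv.contains "P5") (iv.contains "d5") (iv.contains "A5") (iv.contains "d7")
          (iv.contains "m9") (iv.contains "M9") (iv.contains "A9") (iv.contains "P11")
          (iv.contains "A11") (iv.contains "m13") (iv.contains "M13") := rfl

lemma B_eq_core (iv : List String) :
    generate_chord_names_alt iv
      = coreB (iv.contains "m3") (iv.contains "M3") (iv.contains "M7") (iv.contains "m7")
          (iv.contains "P5") (iv.contains "d5") (iv.contains "A5") (iv.contains "d7")
          (iv.contains "m9") (iv.contains "M9") (iv.contains "A9") (iv.contains "P11")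
          (iv.contains "A11") (iv.contains "m13") (iv.contains "M13") := rfl

-- ===== VERDICT (by name: the statement is the Claim_ definition above) =====
theorem generate_chord_names_spec : Claim_equal_generate_chord_names := by
  intro iv _
  unfold Spec_generate_chord_names
  rw [A_eq_core, B_eq_core, core_eq]
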